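-- pv_equiv track=rewrite | github.com/alexpradap/python_coursera | Semana 4/analizar_texto.py | appareances
-- ===== SOURCE A (Python) =====
-- def appareances(texto: str, palabra: str) -> tuple:
--     count = 0
--     first = None
--     last = None
--
--     len_texto = len(texto)
--     len_palabra = len(palabra)
--     for x in range(0, len_texto):
--         if palabra == texto[x:x + len_palabra]:
--             count = count + 1
--             last = x
--             if first == None:
--                 first = last
--     return (count, first, last)
-- ===== SOURCE B (Python) =====
-- def appareances(texto: str, palabra: str) -> tuple:
--     count = 0
--     first = None
--     last = None
--     i = texto.find(palabra)
--     while i != -1: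
--         count += 1
--         if first is None:
--             first = i
--         last = i
--         i = texto.find(palabra, i + 1)
--     return (count, first, last)
-- ===== Notes on version B (the rewrite author's own statement) =====
-- stated objective: faster
-- what changed: B jumps from occurrence to occurrence with str.find(palabra, i+1) in a while loop, tracking count/first/last of the hit positions, instead of A's comparing a fresh slice texto[x:x+len(palabra)] against palabra at every index x.
-- intended difference: For empty palabra A returns count len(texto) with last = len(texto)-1 (its range stops one short of the empty occurrence at position len(texto)); B, following Python's find/count conventions, returns count len(texto)+1 with last = len(texto), the intended number of occurrences of the empty string. — e.g. on appareances("a", ""): A returns [some 1, some 0, some 0], B returns [some 2, some 0, some 1]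
import Mathlib
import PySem

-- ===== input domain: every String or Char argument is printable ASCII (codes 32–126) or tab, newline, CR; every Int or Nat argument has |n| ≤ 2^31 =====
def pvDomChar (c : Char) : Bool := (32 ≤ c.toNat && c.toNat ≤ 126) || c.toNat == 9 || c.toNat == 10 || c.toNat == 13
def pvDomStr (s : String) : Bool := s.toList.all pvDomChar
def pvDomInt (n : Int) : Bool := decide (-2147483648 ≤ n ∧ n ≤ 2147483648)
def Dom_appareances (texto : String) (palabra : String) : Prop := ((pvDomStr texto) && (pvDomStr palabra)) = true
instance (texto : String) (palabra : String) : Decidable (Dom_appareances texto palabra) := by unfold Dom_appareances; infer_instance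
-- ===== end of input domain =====

-- B replaces A's check-every-index scan by jumping from occurrence to occurrence with str.find.

-- ===== PORT A =====
def appareances (texto : String) (palabra : String) : List (Option Int) :=
  let t := texto.toList
  let p := palabra.toList
  let lenTexto : Int := PySem.Chars.len t
  let lenPalabra : Int := PySem.Chars.len p
  let r := (PySem.List.pyRange 0 lenTexto 1).foldl
    (fun (st : Int × Option Int × Option Int) x =>
      if p = PySem.List.slice t (some x) (some (x + lenPalabra)) then
        (st.1 + 1, (if st.2.1 = none then some x else st.2.1), some x)
      else st)
    (0, none, none)
  [some r.1, r.2.1, r.2.2]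

-- ===== PORT B =====
-- the while loop of B: i = texto.find(palabra, start); while i != -1: update; start = i + 1.
-- `fuel` is only a structural-termination guard (start grows past len(texto), so
-- fuel = len(texto) + 1 at entry is never exhausted).
def bLoop (t p : List Char) : Nat → Nat → Int → Option Int → Option Int →
    Int × Option Int × Option Int
  | fuel, start, count, first, last =>
    let i := PySem.Chars.findFrom t p (start : Int) none
    if i = -1 then (count, first, last)
    else
      match fuel with
      | 0 => (count, first, last)
      | fuel + 1 =>
        bLoop t p fuel (i.toNat + 1) (count + 1) (if first = none then some i else first) (some i)

def appareances_alt (texto : String) (palabra : String) : List (Option Int) :=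
  let t := texto.toList
  let p := palabra.toList
  let r := bLoop t p (t.length + 1) 0 0 none none
  [some r.1, r.2.1, r.2.2]

-- ===== PRECONDITION & SPEC =====
-- For empty `palabra` A's range stops one short of the empty occurrence at position len(texto) and
-- returns count len(texto) with last = len(texto)-1; B, like Python's own find/count conventions,
-- also sees the empty occurrence at the end and returns count len(texto)+1 with last = len(texto),
-- the intended number of occurrences of "".
def D_appareances (texto : String) (palabra : String) : Prop := palabra = ""
instance (texto : String) (palabra : String) : Decidable (D_appareances texto palabra) := by
  unfold D_appareances; infer_instance
def Spec_appareances (texto : String) (palabra : String) (out : List (Option Int)) : Prop :=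
  ¬ D_appareances texto palabra → out = appareances_alt texto palabra
instance (texto : String) (palabra : String) (out : List (Option Int)) :
    Decidable (Spec_appareances texto palabra out) := by unfold Spec_appareances; infer_instance
def pvDiffWitness_appareances : String × String := ("a", "")
def pvDiffWitnessOut_appareances : (List (Option Int)) × (List (Option Int)) :=
  ([some 1, some 0, some 0], [some 2, some 0, some 1])

-- ===== CLAIM (what is proved, stated in full; the proofs are below) =====
def Claim_unchanged_appareances : Prop := ∀ (texto : String) (palabra : String), Dom_appareances texto palabra → Spec_appareances texto palabra (appareances texto palabra)
def Claim_changed_appareances : Prop := Dom_appareances (pvDiffWitness_appareances.1) (pvDiffWitness_appareances.2) ∧ D_appareances (pvDiffWitness_appareances.1) (pvDiffWitness_appareances.2) ∧ appareances (pvDiffWitness_appareances.1) (pvDiffWitness_appareances.2) = pvDiffWitnessOut_appareances.1 ∧ appareances_alt (pvDiffWitness_appareances.1) (pvDiffWitness_appareances.2) = pvDiffWitnessOut_appareances.2 ∧ pvDiffWitnessOut_appareances.1 ≠ pvDiffWitnessOut_appareances.2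
def Claim_exact_appareances : Prop := ∀ (texto : String) (palabra : String), Dom_appareances texto palabra → D_appareances texto palabra → appareances texto palabra ≠ appareances_alt texto palabra

-- ===== LEMMAS AND PROOFS =====

-- the match predicate both programs test (A via slice equality, B via find)
def pvMatch (t p : List Char) (x : Nat) : Bool := decide (p <+: t.drop x)

-- the occurrence positions ≥ s (including the end position t.length, reached only by empty p)
def pvM (t p : List Char) (s : Nat) : List Nat :=
  (List.range' s (t.length + 1 - s)).filter (pvMatch t p)

-- the aggregate (count, first, last) both programs compute from a match-position list
def pvAgg (c : Int) (f la : Option Int) (m : List Nat) : Int × Option Int × Option Int :=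
  (c + m.length, f.or (m.head?.map (fun x : Nat => (x : Int))), (m.getLast?.map (fun x : Nat => (x : Int))).or la)

theorem pvAgg_cons (c : Int) (f la : Option Int) (k : Nat) (m : List Nat) :
    pvAgg c f la (k :: m) = pvAgg (c + 1) (if f = none then some (k : Int) else f) (some (k : Int)) m := by
  simp only [pvAgg, List.length_cons, List.head?_cons, List.getLast?_cons,
    Prod.mk.injEq]
  refine ⟨by push_cast; ring, ?_, ?_⟩
  · cases f <;> simp [Option.or]
  · cases hm : m.getLast? <;> simp [Option.or]

theorem pvAgg_nil (c : Int) (f la : Option Int) : pvAgg c f la [] = (c, f, la) := by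
  simp only [pvAgg, List.length_nil, Nat.cast_zero, add_zero, List.head?_nil,
    List.getLast?_nil, Option.map_none, Option.or_none, Option.none_or]

theorem pvSlice_eq_iff (t p : List Char) (k : Nat) :
    (p = PySem.List.slice t (some (k : Int)) (some ((k : Int) + (p.length : Int)))) ↔ p <+: t.drop k := by
  rw [PySem.List.slice_natCast_add t k p.length, List.prefix_iff_eq_take]

theorem pvNoMatch_range' (t p : List Char) (s n : Nat)
    (hnone : ∀ i, s ≤ i → i < s + n → ¬ p <+: t.drop i) :
    (List.range' s n).filter (pvMatch t p) = [] := by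
  induction n generalizing s with
  | zero => simp
  | succ n ih =>
    rw [List.range'_succ]
    simp only [List.filter_cons]
    have h0 : pvMatch t p s = false := by
      simp only [pvMatch, decide_eq_false_iff_not]
      exact hnone s le_rfl (by omega)
    rw [h0]
    exact ih (s + 1) (fun i h1 h2 => hnone i (by omega) (by omega))

-- if p occurs nowhere at a position ≥ s then it is not an infix of t.drop s, and conversely
theorem pvInfix_of_prefix_drop (t p : List Char) (s j : Nat) (hsj : s ≤ j)
    (h : p <+: t.drop j) : p <:+: t.drop s := by
  have hdd : t.drop j = (t.drop s).drop (j - s) := by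
    rw [List.drop_drop]; congr 1; omega
  rw [hdd] at h
  exact h.isInfix.trans (List.drop_suffix _ _).isInfix

theorem pvM_empty (t p : List Char) (s : Nat)
    (hnone : ∀ j, s ≤ j → ¬ p <+: t.drop j) : pvM t p s = [] :=
  pvNoMatch_range' t p s _ (fun i h1 _ => hnone i h1)

-- split off the first occurrence ≥ s
theorem pvM_cons (t p : List Char) (s i : Nat) (hsi : s ≤ i) (hil : i ≤ t.length)
    (hmatch : p <+: t.drop i) (hmin : ∀ j, s ≤ j → j < i → ¬ p <+: t.drop j) :
    pvM t p s = i :: pvM t p (i + 1) := by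
  unfold pvM
  have hsplit : List.range' s (t.length + 1 - s) =
      List.range' s (i - s) ++ List.range' i (t.length + 1 - i) := by
    rw [show t.length + 1 - s = (i - s) + (t.length + 1 - i) from by omega,
      ← List.range'_append_1, show s + (i - s) = i from by omega]
  rw [hsplit, List.filter_append, pvNoMatch_range' t p s (i - s)
    (fun j h1 h2 => hmin j h1 (by omega)), List.nil_append]
  rw [show t.length + 1 - i = (t.length - i) + 1 from by omega, List.range'_succ,
    List.filter_cons]
  have hb : pvMatch t p i = true := by simp [pvMatch, hmatch]
  rw [hb]
  simp only [if_true]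
  rw [show t.length + 1 - (i + 1) = t.length - i from by omega]

-- a successful find result is ≥ the start index and within the text
theorem pvFindFrom_progress (t p : List Char) (s : Nat)
    (h : PySem.Chars.findFrom t p (s : Int) none ≠ -1) :
    s ≤ (PySem.Chars.findFrom t p (s : Int) none).toNat ∧
      (PySem.Chars.findFrom t p (s : Int) none).toNat ≤ t.length ∧ s ≤ t.length := by
  by_cases hs : s ≤ t.length
  · have hspec := PySem.Chars.findFrom_natCast_spec t p s hs h
    have hif := PySem.Chars.findFrom_natCast t p s hs
    have hfl := PySem.Chars.find_le_length (t.drop s) p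
    rw [List.length_drop] at hfl
    constructor
    · omega
    · constructor
      · by_cases hfind : PySem.Chars.find (t.drop s) p = -1
        · rw [hif, if_pos hfind] at h; exact absurd rfl h
        · rw [hif, if_neg hfind]; omega
      · exact hs
  · exfalso
    apply h
    simp only [PySem.Chars.findFrom]
    have h1 : ¬ ((s : Int) < 0) := by omega
    have h2 : (t.length : Int) < (s : Int) := by omega
    simp [h1, h2]

-- B's loop computes the aggregate of the occurrences ≥ start
theorem pvBLoop_eq (t p : List Char) (fuel start : Nat) (c : Int) (f la : Option Int)
    (hf : t.length + 1 ≤ fuel + start) :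
    bLoop t p fuel start c f la = pvAgg c f la (pvM t p start) := by
  induction fuel generalizing start c f la with
  | zero =>
    have hoob : t.length < start := by omega
    rw [bLoop]
    have hm1 : PySem.Chars.findFrom t p (start : Int) none = -1 := by
      simp only [PySem.Chars.findFrom]
      have h1 : ¬ ((start : Int) < 0) := by omega
      have h2 : (t.length : Int) < (start : Int) := by omega
      simp [h1, h2]
    have hM : pvM t p start = [] := by
      unfold pvM
      rw [show t.length + 1 - start = 0 from by omega]; simp
    simp [hm1, hM, pvAgg_nil]
  | succ fuel ih =>
    rw [bLoop]
    by_cases hi : PySem.Chars.findFrom t p (start : Int) none = -1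
    · simp only [hi]
      by_cases hs : start ≤ t.length
      · have hnone := (PySem.Chars.findFrom_natCast_eq_neg_one_iff t p start hs).mp hi
        have hM : pvM t p start = [] := by
          refine pvM_empty t p start (fun j hj hpre => hnone ?_)
          exact pvInfix_of_prefix_drop t p start j hj hpre
        rw [hM, pvAgg_nil]
        simp
      · have hM : pvM t p start = [] := by
          unfold pvM
          rw [show t.length + 1 - start = 0 from by omega]; simp
        rw [hM, pvAgg_nil]
        simp
    · simp only [hi]
      have hprog := pvFindFrom_progress t p start hi
      obtain ⟨hsi, hil, hs⟩ := hprog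
      have hspec := PySem.Chars.findFrom_natCast_spec t p start hs hi
      obtain ⟨hge, hpre, hmin⟩ := hspec
      set i := PySem.Chars.findFrom t p (start : Int) none with hidef
      have hicast : ((i.toNat : Nat) : Int) = i := by omega
      rw [ih (i.toNat + 1) _ _ _ (by omega),
        pvM_cons t p start i.toNat hsi hil hpre (fun j h1 h2 => hmin j h1 h2),
        pvAgg_cons]
      rw [hicast]
      simp

-- A's fold over any (cast) index list computes the aggregate of the matching indices
theorem pvFoldA_eq (t p : List Char) (l : List Nat) (c : Int) (f la : Option Int) :
    (List.foldl
      (fun (st : Int × Option Int × Option Int) x =>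
        if p = PySem.List.slice t (some x) (some (x + PySem.Chars.len p)) then
          (st.1 + 1, (if st.2.1 = none then some x else st.2.1), some x)
        else st)
      (c, f, la) (List.map (fun k : Nat => (k : Int)) l)) = pvAgg c f la (l.filter (pvMatch t p)) := by
  induction l generalizing c f la with
  | nil => simp [pvAgg_nil]
  | cons k l ih =>
    rw [List.map_cons, List.foldl_cons, List.filter_cons]
    by_cases hm : p <+: t.drop k
    · have hc : p = PySem.List.slice t (some (k : Int)) (some ((k : Int) + PySem.Chars.len p)) := by
        rw [PySem.Chars.len_eq]
        exact (pvSlice_eq_iff t p k).mpr hm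
      rw [if_pos hc]
      have hb : pvMatch t p k = true := by simp [pvMatch, hm]
      rw [hb, if_pos rfl, ih, pvAgg_cons]
    · have hc : ¬ (p = PySem.List.slice t (some (k : Int)) (some ((k : Int) + PySem.Chars.len p))) := by
        rw [PySem.Chars.len_eq]
        exact fun h => hm ((pvSlice_eq_iff t p k).mp h)
      rw [if_neg hc]
      have hb : pvMatch t p k = false := by simp [pvMatch, hm]
      rw [hb]
      simp only [Bool.false_eq_true, if_false]
      exact ih c f la

theorem pvA_eq (texto palabra : String) :
    appareances texto palabra =
      [some ((((List.range texto.toList.length).filter (pvMatch texto.toList palabra.toList)).length : Nat) : Int),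
       ((List.range texto.toList.length).filter (pvMatch texto.toList palabra.toList)).head?.map (fun x : Nat => (x : Int)),
       ((List.range texto.toList.length).filter (pvMatch texto.toList palabra.toList)).getLast?.map (fun x : Nat => (x : Int))] := by
  simp only [appareances]
  rw [PySem.List.pyRange_one,
    show PySem.Chars.len texto.toList - 0 = ((texto.toList.length : Nat) : Int) from by simp,
    Int.toNat_natCast]
  have hmap : (List.range texto.toList.length).map (fun k : Nat => (0 : Int) + (k : Int)) =
      (List.range texto.toList.length).map (fun k : Nat => (k : Int)) := by
    simp
  rw [hmap, pvFoldA_eq texto.toList palabra.toList (List.range texto.toList.length) 0 none none]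
  simp only [pvAgg, zero_add, Option.none_or, Option.or_none]

theorem pvB_eq (texto palabra : String) :
    appareances_alt texto palabra =
      [some (((pvM texto.toList palabra.toList 0).length : Nat) : Int),
       (pvM texto.toList palabra.toList 0).head?.map (fun x : Nat => (x : Int)),
       (pvM texto.toList palabra.toList 0).getLast?.map (fun x : Nat => (x : Int))] := by
  simp only [appareances_alt]
  rw [pvBLoop_eq texto.toList palabra.toList (texto.toList.length + 1) 0 0 none none (by omega)]
  simp only [pvAgg, zero_add, Option.none_or, Option.or_none]

-- outside D_ (nonempty palabra) the two match lists coincide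
theorem pvM_eq_range_filter (texto palabra : String) (hp : palabra.toList ≠ []) :
    pvM texto.toList palabra.toList 0 =
      (List.range texto.toList.length).filter (pvMatch texto.toList palabra.toList) := by
  unfold pvM
  rw [Nat.sub_zero, ← List.range_eq_range', List.range_succ, List.filter_append]
  have hlast : pvMatch texto.toList palabra.toList texto.toList.length = false := by
    simp only [pvMatch, decide_eq_false_iff_not, List.drop_length]
    intro h
    exact hp (List.prefix_nil.mp h)
  simp only [List.filter_cons, List.filter_nil, hlast, Bool.false_eq_true, if_false,
    List.append_nil]

-- ===== VERDICT (by name: the statement is the Claim_ definition above) =====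
theorem appareances_spec : Claim_unchanged_appareances := by
  intro texto palabra _ hD
  have hp : palabra.toList ≠ [] := by
    intro h
    exact hD (String.toList_eq_nil_iff.mp h)
  rw [pvA_eq, pvB_eq, pvM_eq_range_filter texto palabra hp]

theorem appareances_changed : Claim_changed_appareances := by
  unfold Claim_changed_appareances; decide

theorem appareances_tight : Claim_exact_appareances := by
  intro texto palabra _ hD
  have hp : palabra.toList = [] := String.toList_eq_nil_iff.mpr hD
  rw [pvA_eq, pvB_eq]
  have htrue : ∀ x, pvMatch texto.toList palabra.toList x = true := by
    intro x; simp [pvMatch, hp]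
  intro heq
  have hlen : (((List.range texto.toList.length).filter
        (pvMatch texto.toList palabra.toList)).length : Int) =
      ((pvM texto.toList palabra.toList 0).length : Int) := by
    have := congrArg (fun l : List (Option Int) => l.head?) heq
    simpa using this
  rw [List.filter_eq_self.mpr (fun a _ => htrue a)] at hlen
  unfold pvM at hlen
  rw [List.filter_eq_self.mpr (fun a _ => htrue a)] at hlen
  simp [List.length_range'] at hlen
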